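-- pv_equiv track=rewrite | github.com/youshengithub/y_compiler | proprocesser.py | process_note
-- ===== SOURCE A (Python) =====
-- def process_note(text):
--     content=""
--     file=text.split("\n")
--     for line in file:
--         pos=line.find("//")
--         if pos!=-1:
--             content+=line[0:pos]+"\n"
--         else:
--             content+=line+"\n"
--     return content
-- ===== SOURCE B (Python) =====
-- def process_note(text):
--     # single pass over the whole string with an "inside comment" flag,
--     # instead of splitting into lines and calling find on each
--     out = []
--     comment = False
--     for i, c in enumerate(text):
--         if comment:
--             if c == '\n':
--                 comment = False
--                 out.append(c)
--         elif c == '/' and text[i + 1:i + 2] == '/':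
--             comment = True
--         else:
--             out.append(c)
--     out.append('\n')
--     return ''.join(out)
-- ===== Notes on version B (the rewrite author's own statement) =====
-- stated objective: alternative
-- what changed: Replaces A's split-into-lines loop with per-line find/slice by a single character-level scan over the whole string that tracks an inside-comment flag and emits kept characters, appending one final newline.
import Mathlib
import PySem

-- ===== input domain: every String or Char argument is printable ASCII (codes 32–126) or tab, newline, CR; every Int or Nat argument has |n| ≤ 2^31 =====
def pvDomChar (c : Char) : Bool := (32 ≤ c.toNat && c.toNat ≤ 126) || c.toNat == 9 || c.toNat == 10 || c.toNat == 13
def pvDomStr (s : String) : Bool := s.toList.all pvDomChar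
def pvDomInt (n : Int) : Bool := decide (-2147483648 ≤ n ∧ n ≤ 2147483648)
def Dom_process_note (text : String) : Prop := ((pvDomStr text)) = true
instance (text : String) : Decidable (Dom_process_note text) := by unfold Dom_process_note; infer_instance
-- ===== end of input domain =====

set_option maxRecDepth 4000


-- B replaces A's line-splitting loop (find "//" and slice on each line) by one
-- character-level scan of the whole string with an inside-comment flag.

-- ===== PORT A =====
def process_note (text : String) : String :=
  let content : String := ""
  -- text.split("\n"): the separator "\n" is non-empty, so Str.split? is `some`; .getD [] is exact
  let file : List String := (PySem.Str.split? text "\n").getD []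
  file.foldl (fun content line =>
    let pos : Int := PySem.Str.find line "//"
    if pos ≠ -1 then content ++ PySem.Str.slice line (some 0) (some pos) ++ "\n"
    else content ++ line ++ "\n") content

-- ===== PORT B =====
-- the scan loop of Source B: `comment` flag, emit kept characters; lookahead text[i+1:i+2]=='/'
def pvScan : Bool → List Char → List Char
  | _, [] => []
  | true, c :: rest => if c = '\n' then c :: pvScan false rest else pvScan true rest
  | false, c :: rest =>
      if c = '/' ∧ rest.head? = some '/' then pvScan true rest
      else c :: pvScan false rest

def process_note_alt (text : String) : String :=
  String.ofList (pvScan false text.toList ++ ['\n'])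

-- ===== PRECONDITION & SPEC =====
def Spec_process_note (text : String) (out : String) : Prop := out = process_note_alt text
instance (text : String) (out : String) : Decidable (Spec_process_note text out) := by unfold Spec_process_note; infer_instance

-- ===== CLAIM (what is proved, stated in full; the proofs are below) =====
def Claim_equal_process_note : Prop := ∀ (text : String), Dom_process_note text → Spec_process_note text (process_note text)

-- ===== LEMMAS AND PROOFS =====

-- a line up to its first "//" (the value A's find/slice computes per line,
-- and what B's scan emits per line)
def stripF : List Char → List Char
  | [] => []
  | c :: rest => if c = '/' ∧ rest.head? = some '/' then [] else c :: stripF rest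

-- structural version of text.split("\n")
def mySplit : List Char → List (List Char)
  | [] => [[]]
  | c :: rest => if c = '\n' then [] :: mySplit rest else (mySplit rest).modifyHead (c :: ·)

theorem mySplit_ne_nil (l : List Char) : mySplit l ≠ [] := by
  cases l with
  | nil => simp [mySplit]
  | cons c rest =>
    simp only [mySplit]
    split
    · simp
    · cases h : mySplit rest with
      | nil => exact absurd h (mySplit_ne_nil rest)
      | cons a t => simp [List.modifyHead]

theorem prefix2 (c : Char) (rest : List Char) :
    (['/', '/'].isPrefixOf (c :: rest)) = true ↔ c = '/' ∧ rest.head? = some '/' := by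
  cases rest with
  | nil => simp [List.isPrefixOf]
  | cons d t =>
    simp only [List.isPrefixOf, Bool.and_eq_true, beq_iff_eq, List.head?_cons, Option.some.injEq]
    constructor
    · rintro ⟨h1, h2, _⟩
      exact ⟨h1.symm, h2.symm⟩
    · rintro ⟨h1, h2⟩
      exact ⟨h1.symm, h2.symm, by simp⟩

theorem goShift (l : List Char) (k : Nat) :
    PySem.Chars.find.go ['/', '/'] l (k + 1) =
      if PySem.Chars.find.go ['/', '/'] l k = -1 then -1
      else PySem.Chars.find.go ['/', '/'] l k + 1 := by
  induction l generalizing k with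
  | nil => simp [PySem.Chars.find.go]
  | cons c rest ih =>
    simp only [PySem.Chars.find.go]
    split
    · have : ¬ ((k : Int) = -1) := by omega
      simp [this]
    · exact ih (k + 1)

theorem stripFind (l : List Char) :
    stripF l = if PySem.Chars.find l ['/', '/'] = -1 then l
               else l.take (PySem.Chars.find l ['/', '/']).toNat := by
  induction l with
  | nil => simp [stripF, PySem.Chars.find, PySem.Chars.find.go]
  | cons c rest ih =>
    simp only [PySem.Chars.find, PySem.Chars.find.go] at *
    by_cases hp : c = '/' ∧ rest.head? = some '/'
    · obtain ⟨hc, hh⟩ := hp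
      cases rest with
      | nil => simp at hh
      | cons a b =>
        have ha : a = '/' := by simpa using hh
        subst ha hc
        simp [stripF, List.isPrefixOf]
    · have hnp : ¬ (['/', '/'].isPrefixOf (c :: rest) = true) := fun h => hp ((prefix2 c rest).mp h)
      simp only [stripF, if_neg hp, hnp, Bool.not_eq_true] at *
      rw [show (0 : Nat) + 1 = 0 + 1 from rfl, goShift rest 0]
      by_cases h0 : PySem.Chars.find.go ['/', '/'] rest 0 = -1
      · simp [h0, ih]
      · have hge : 0 ≤ PySem.Chars.find.go ['/', '/'] rest 0 := by
          have := PySem.Chars.neg_one_le_find rest ['/', '/']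
          simp only [PySem.Chars.find] at this
          omega
        have h1 : ¬ (PySem.Chars.find.go ['/', '/'] rest 0 + 1 = -1) := by omega
        have ht : (PySem.Chars.find.go ['/', '/'] rest 0 + 1).toNat
            = (PySem.Chars.find.go ['/', '/'] rest 0).toNat + 1 := by omega
        simp [h0, h1, ht, ih, List.take_succ_cons]

-- splitOn.go with sep = "\n", enough fuel: explicit accumulator invariant
theorem go_spec (fuel : Nat) (l cur : List Char) (acc : List (List Char))
    (h : l.length ≤ fuel) :
    PySem.Chars.splitOn.go ['\n'] fuel l cur acc =
      acc.reverse ++ (mySplit l).modifyHead (cur.reverse ++ ·) := by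
  induction l generalizing fuel cur acc with
  | nil =>
    cases fuel with
    | zero => simp [PySem.Chars.splitOn.go, mySplit]
    | succ f => simp [PySem.Chars.splitOn.go, mySplit]
  | cons c rest ih =>
    cases fuel with
    | zero => simp at h
    | succ f =>
      simp only [PySem.Chars.splitOn.go]
      by_cases hc : c = '\n'
      · have hpre : ['\n'].isPrefixOf (c :: rest) = true := by simp [List.isPrefixOf, hc]
        rw [if_pos hpre]
        have : List.drop ['\n'].length (c :: rest) = rest := by simp
        rw [this, ih f [] (cur.reverse :: acc) (by simpa using Nat.le_of_succ_le_succ h)]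
        cases hms : mySplit rest with
        | nil => exact absurd hms (mySplit_ne_nil rest)
        | cons a t => simp [mySplit, hc, hms, List.modifyHead]
      · have hpre : ¬ (['\n'].isPrefixOf (c :: rest) = true) := by
          simp [List.isPrefixOf]
          exact fun h => hc h.symm
        rw [if_neg hpre]
        rw [ih f (c :: cur) acc (by simpa using Nat.le_of_succ_le_succ h)]
        cases hms : mySplit rest with
        | nil => exact absurd hms (mySplit_ne_nil rest)
        | cons a t => simp [mySplit, hc, hms, List.modifyHead]

theorem splitOn_eq_mySplit (l : List Char) :
    PySem.Chars.splitOn l ['\n'] = mySplit l := by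
  have := go_spec (l.length + 1) l [] [] (by omega)
  simp only [PySem.Chars.splitOn, this, List.reverse_nil, List.nil_append]
  cases hms : mySplit l with
  | nil => exact absurd hms (mySplit_ne_nil l)
  | cons a t => simp [List.modifyHead]

-- mySplit decompositions
theorem mySplit_no_nl (l : List Char) (h : '\n' ∉ l) : mySplit l = [l] := by
  induction l with
  | nil => rfl
  | cons c rest ih =>
    have hc : c ≠ '\n' := fun hc => h (by simp [hc])
    simp [mySplit, hc, ih (fun hm => h (by simp [hm])), List.modifyHead]

theorem mySplit_append (line rest : List Char) (h : '\n' ∉ line) :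
    mySplit (line ++ '\n' :: rest) = line :: mySplit rest := by
  induction line with
  | nil => simp [mySplit]
  | cons c t ih =>
    have hc : c ≠ '\n' := fun hc => h (by simp [hc])
    rw [List.cons_append]
    simp only [mySplit, if_neg hc, ih (fun hm => h (by simp [hm]))]
    rfl

-- pvScan in comment mode skips up to the next newline
theorem pvScan_true_skip (l m : List Char) (h : '\n' ∉ l) :
    pvScan true (l ++ m) = pvScan true m := by
  induction l with
  | nil => rfl
  | cons c t ih =>
    have hc : c ≠ '\n' := fun hc => h (by simp [hc])
    simp [pvScan, hc, ih (fun hm => h (by simp [hm]))]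

theorem pvScan_true_none (l : List Char) (h : '\n' ∉ l) : pvScan true l = [] := by
  have := pvScan_true_skip l [] h
  simpa using this

theorem pvScan_false_line (line rest : List Char) (h : '\n' ∉ line) :
    pvScan false (line ++ '\n' :: rest) = stripF line ++ '\n' :: pvScan false rest := by
  induction line with
  | nil => simp [pvScan, stripF]
  | cons c t ih =>
    have hc : c ≠ '\n' := fun hc => h (by simp [hc])
    have ht : '\n' ∉ t := fun hm => h (by simp [hm])
    by_cases hp : c = '/' ∧ t.head? = some '/'
    · have hp' : c = '/' ∧ (t ++ '\n' :: rest).head? = some '/' := by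
        cases t with
        | nil => exact absurd hp.2 (by simp)
        | cons a b => simpa using hp
      simp [pvScan, hp', stripF, hp, pvScan_true_skip t ('\n' :: rest) ht]
    · have hp' : ¬ (c = '/' ∧ (t ++ '\n' :: rest).head? = some '/') := by
        cases t with
        | nil =>
          rintro ⟨h1, h2⟩
          simp at h2
        | cons a b =>
          intro hq
          exact hp (by simpa using hq)
      simp only [List.cons_append, pvScan, if_neg hp', stripF, if_neg hp, ih ht]

theorem pvScan_false_last (line : List Char) (h : '\n' ∉ line) :
    pvScan false line = stripF line := by
  induction line with
  | nil => rfl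
  | cons c t ih =>
    have ht : '\n' ∉ t := fun hm => h (by simp [hm])
    by_cases hp : c = '/' ∧ t.head? = some '/'
    · simp [pvScan, hp, stripF, pvScan_true_none t ht]
    · simp [pvScan, hp, stripF, ih ht]

-- every string either has no newline or splits at its first newline
theorem first_nl (s : List Char) :
    '\n' ∉ s ∨ ∃ line rest, s = line ++ '\n' :: rest ∧ '\n' ∉ line := by
  induction s with
  | nil => exact Or.inl (by simp)
  | cons c t ih =>
    by_cases hc : c = '\n'
    · exact Or.inr ⟨[], t, by simp [hc], by simp⟩
    · cases ih with
      | inl h => exact Or.inl (by simp [hc, h, Ne.symm])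
      | inr h =>
        obtain ⟨line, rest, heq, hnl⟩ := h
        exact Or.inr ⟨c :: line, rest, by simp [heq], by simp [hc, hnl, Ne.symm]⟩

-- MAIN: B's scan equals the concatenation of stripped lines, each + '\n'
theorem scan_main (s : List Char) :
    pvScan false s ++ ['\n'] =
      ((mySplit s).map (fun l => stripF l ++ ['\n'])).flatten := by
  cases first_nl s with
  | inl h =>
    rw [mySplit_no_nl s h, pvScan_false_last s h]
    simp
  | inr h =>
    obtain ⟨line, rest, heq, hnl⟩ := h
    subst heq
    rw [mySplit_append line rest hnl, pvScan_false_line line rest hnl]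
    have ih := scan_main rest
    simp only [List.map_cons, List.flatten_cons, ← ih]
    simp
termination_by s.length
decreasing_by
  simp [heq]
  omega

-- A's per-line body computes stripF
theorem line_eq (line : String) :
    (if PySem.Str.find line "//" ≠ -1
       then PySem.Str.slice line (some 0) (some (PySem.Str.find line "//"))
       else line).toList = stripF line.toList := by
  rw [stripFind line.toList]
  have hfe : PySem.Str.find line "//" = PySem.Chars.find line.toList ['/', '/'] := by
    simp
  by_cases h : PySem.Chars.find line.toList ['/', '/'] = -1
  · simp [h]
  · have hge : 0 ≤ PySem.Chars.find line.toList ['/', '/'] := by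
      have := PySem.Chars.neg_one_le_find line.toList ['/', '/']
      omega
    have hcast : PySem.Chars.find line.toList ['/', '/']
        = ((PySem.Chars.find line.toList ['/', '/']).toNat : Int) := by omega
    simp only [hfe, ne_eq, h, not_false_eq_true, if_pos]
    rw [PySem.Str.toList_slice]
    simp only [PySem.Chars.slice_eq_listSlice]
    rw [hcast, show ((0 : Int) = ((0 : Nat) : Int)) from rfl, PySem.List.slice_natCast]
    simp
    omega

-- A's fold concatenates the per-line results
theorem fold_eq (file : List String) (init : String) :
    (file.foldl (fun content line =>
        let pos : Int := PySem.Str.find line "//"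
        if pos ≠ -1 then content ++ PySem.Str.slice line (some 0) (some pos) ++ "\n"
        else content ++ line ++ "\n") init).toList =
      init.toList ++ ((file.map String.toList).map (fun l => stripF l ++ ['\n'])).flatten := by
  induction file generalizing init with
  | nil => simp
  | cons line t ih =>
    simp only [List.foldl_cons, List.map_cons, List.flatten_cons]
    rw [ih]
    have hl := line_eq line
    by_cases h : PySem.Str.find line "//" ≠ -1
    · simp only [if_pos h] at hl ⊢
      simp [hl.symm]
    · simp only [if_neg h] at hl ⊢
      simp [hl.symm]

-- ===== VERDICT (by name: the statement is the Claim_ definition above) =====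
theorem process_note_spec : Claim_equal_process_note := by
  intro text _
  unfold Spec_process_note
  have hs : PySem.Chars.split? text.toList "\n".toList = some (mySplit text.toList) := by
    have : ("\n" : String).toList = ['\n'] := by decide
    rw [this, PySem.Chars.split?]
    simp [splitOn_eq_mySplit]
  have hmap := PySem.Str.split?_map text "\n"
  rw [hs] at hmap
  obtain ⟨file, hfile, hfl⟩ := Option.map_eq_some_iff.mp hmap
  have h : (process_note text).toList = (process_note_alt text).toList := by
    unfold process_note process_note_alt
    dsimp only
    rw [hfile]
    simp only [Option.getD_some]
    rw [fold_eq file "", hfl, ← scan_main]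
    simp
  have := congrArg String.ofList h
  simpa using this
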